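-- pv_equiv track=rewrite | github.com/DataArcTech/JudgeAgent | JudgeAgent/judge_agent.py | get_statistic
-- ===== SOURCE A (Python) =====
-- from typing import List, Dict, Any, Tuple, Union
--
-- def get_statistic(corrects1: List[bool], corrects2: List[bool]) -> Dict[str, Dict]:
--     statistic: Dict[str, Dict] = {
--         "accuracy_before_eval": {"num": 0, "total": 0},
--         "accuracy_after_eval": {"num": 0, "total": 0},
--         "correction_rate": {"num": 0, "total": 0},
--         "false_correction_rate": {"num": 0, "total": 0},
--     }
--     for c1, c2 in zip(corrects1, corrects2):
--         if c1:
--             statistic["accuracy_before_eval"]["num"] += 1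
--         if c2:
--             statistic["accuracy_after_eval"]["num"] += 1
--         if not c1 and c2:
--             statistic["correction_rate"]["num"] += 1
--         if c1 and not c2:
--             statistic["false_correction_rate"]["num"] += 1
--
--     for k in statistic.keys():
--         statistic[k]["total"] = len(corrects1)
--
--     return statistic
-- ===== SOURCE B (Python) =====
-- from typing import List, Dict
--
-- def get_statistic(corrects1: List[bool], corrects2: List[bool]) -> Dict[str, Dict]:
--     pairs = list(zip(corrects1, corrects2))
--     total = len(corrects1)
--     acc_before = sum(1 for c1, _ in pairs if c1)
--     acc_after = sum(1 for _, c2 in pairs if c2)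
--     corrected = sum(1 for c1, c2 in pairs if not c1 and c2)
--     false_corrected = sum(1 for c1, c2 in pairs if c1 and not c2)
--     return {
--         "accuracy_before_eval": {"num": acc_before, "total": total},
--         "accuracy_after_eval": {"num": acc_after, "total": total},
--         "correction_rate": {"num": corrected, "total": total},
--         "false_correction_rate": {"num": false_corrected, "total": total},
--     }
-- ===== Notes on version B (the rewrite author's own statement) =====
-- stated objective: simpler
-- what changed: Replaces A's single fused loop mutating a dict of dicts (plus a second loop filling totals) with one zip and four independent counting passes whose results are assembled directly into the returned dict.
import Mathlib
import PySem

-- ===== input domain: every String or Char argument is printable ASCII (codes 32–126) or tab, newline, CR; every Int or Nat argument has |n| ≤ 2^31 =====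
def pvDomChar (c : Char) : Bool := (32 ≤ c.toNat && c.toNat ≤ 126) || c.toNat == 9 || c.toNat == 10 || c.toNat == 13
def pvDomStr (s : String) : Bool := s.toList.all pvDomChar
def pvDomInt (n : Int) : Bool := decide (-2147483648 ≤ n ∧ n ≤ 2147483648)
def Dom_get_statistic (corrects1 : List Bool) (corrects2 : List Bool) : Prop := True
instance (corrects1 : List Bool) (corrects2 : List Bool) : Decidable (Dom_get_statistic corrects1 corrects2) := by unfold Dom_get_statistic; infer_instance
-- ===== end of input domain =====

-- B replaces A's single fused accumulation loop (a dict of dicts mutated per pair, then a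
-- second loop filling totals) by one zip plus four independent counting passes, assembling
-- the result dict directly from the four counts (objective: simpler).

-- ===== PORT A =====
-- the body of A's 'for c1, c2 in zip(...)' loop
def gsStep (st : PySem.Dict String (PySem.Dict String Int)) (p : Bool × Bool) :
    PySem.Dict String (PySem.Dict String Int) :=
  let st := if p.1 then st.modify "accuracy_before_eval" PySem.Dict.empty (fun inner => inner.modify "num" 0 (· + 1)) else st
  let st := if p.2 then st.modify "accuracy_after_eval" PySem.Dict.empty (fun inner => inner.modify "num" 0 (· + 1)) else st
  let st := if !p.1 && p.2 then st.modify "correction_rate" PySem.Dict.empty (fun inner => inner.modify "num" 0 (· + 1)) else st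
  let st := if p.1 && !p.2 then st.modify "false_correction_rate" PySem.Dict.empty (fun inner => inner.modify "num" 0 (· + 1)) else st
  st

def get_statistic (corrects1 : List Bool) (corrects2 : List Bool) : List (String × List (String × Int)) :=
  let statistic : PySem.Dict String (PySem.Dict String Int) :=
    PySem.Dict.ofList [("accuracy_before_eval", PySem.Dict.ofList [("num", 0), ("total", 0)]),
      ("accuracy_after_eval", PySem.Dict.ofList [("num", 0), ("total", 0)]),
      ("correction_rate", PySem.Dict.ofList [("num", 0), ("total", 0)]),
      ("false_correction_rate", PySem.Dict.ofList [("num", 0), ("total", 0)])]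
  let statistic := (corrects1.zip corrects2).foldl gsStep statistic
  -- 'for k in statistic.keys(): statistic[k]["total"] = len(corrects1)'
  let statistic := statistic.keys.foldl
    (fun st k => st.modify k PySem.Dict.empty (fun inner => inner.insert "total" (corrects1.length : Int))) statistic
  statistic.items.map (fun p => (p.1, p.2.items))

-- ===== PORT B =====
def get_statistic_alt (corrects1 : List Bool) (corrects2 : List Bool) : List (String × List (String × Int)) :=
  let pairs := corrects1.zip corrects2
  let total : Int := corrects1.length
  let accBefore : Int := pairs.countP (fun p => p.1)
  let accAfter : Int := pairs.countP (fun p => p.2)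
  let corrected : Int := pairs.countP (fun p => !p.1 && p.2)
  let falseCorrected : Int := pairs.countP (fun p => p.1 && !p.2)
  [("accuracy_before_eval", [("num", accBefore), ("total", total)]),
   ("accuracy_after_eval", [("num", accAfter), ("total", total)]),
   ("correction_rate", [("num", corrected), ("total", total)]),
   ("false_correction_rate", [("num", falseCorrected), ("total", total)])]

-- ===== PRECONDITION & SPEC =====
def Spec_get_statistic (corrects1 : List Bool) (corrects2 : List Bool) (out : List (String × List (String × Int))) : Prop := out = get_statistic_alt corrects1 corrects2
instance (corrects1 : List Bool) (corrects2 : List Bool) (out : List (String × List (String × Int))) : Decidable (Spec_get_statistic corrects1 corrects2 out) := by unfold Spec_get_statistic; infer_instance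

-- ===== CLAIM (what is proved, stated in full; the proofs are below) =====
def Claim_equal_get_statistic : Prop := ∀ (corrects1 : List Bool) (corrects2 : List Bool), Dom_get_statistic corrects1 corrects2 → Spec_get_statistic corrects1 corrects2 (get_statistic corrects1 corrects2)

-- ===== LEMMAS AND PROOFS =====

-- the shape A's dict always has during the first loop: four fixed keys, totals still 0
def mkSt (a b c d : Int) : PySem.Dict String (PySem.Dict String Int) :=
  PySem.Dict.mk [("accuracy_before_eval", PySem.Dict.mk [("num", a), ("total", 0)]),
    ("accuracy_after_eval", PySem.Dict.mk [("num", b), ("total", 0)]),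
    ("correction_rate", PySem.Dict.mk [("num", c), ("total", 0)]),
    ("false_correction_rate", PySem.Dict.mk [("num", d), ("total", 0)])]

lemma gsStep_mkSt (a b c d : Int) (p : Bool × Bool) :
    gsStep (mkSt a b c d) p =
      mkSt (a + if p.1 then 1 else 0) (b + if p.2 then 1 else 0)
        (c + if !p.1 && p.2 then 1 else 0) (d + if p.1 && !p.2 then 1 else 0) := by
  obtain ⟨c1, c2⟩ := p
  cases c1 <;> cases c2 <;>
    simp [gsStep, mkSt, PySem.Dict.modify, PySem.Dict.insert, PySem.Dict.get?,
      PySem.Dict.contains, PySem.Dict.getD, List.find?]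

lemma foldl_gsStep_mkSt (l : List (Bool × Bool)) (a b c d : Int) :
    l.foldl gsStep (mkSt a b c d) =
      mkSt (a + l.countP (fun p => p.1)) (b + l.countP (fun p => p.2))
        (c + l.countP (fun p => !p.1 && p.2)) (d + l.countP (fun p => p.1 && !p.2)) := by
  induction l generalizing a b c d with
  | nil => simp
  | cons p l ih =>
      rw [List.foldl_cons, gsStep_mkSt, ih]
      obtain ⟨c1, c2⟩ := p
      cases c1 <;> cases c2 <;> simp <;> ring_nf

-- ===== VERDICT (by name: the statement is the Claim_ definition above) =====

theorem get_statistic_spec : Claim_equal_get_statistic := by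
  intro corrects1 corrects2 _
  unfold Spec_get_statistic get_statistic get_statistic_alt
  have hinit : PySem.Dict.ofList
      [("accuracy_before_eval", PySem.Dict.ofList [("num", (0:Int)), ("total", 0)]),
        ("accuracy_after_eval", PySem.Dict.ofList [("num", 0), ("total", 0)]),
        ("correction_rate", PySem.Dict.ofList [("num", 0), ("total", 0)]),
        ("false_correction_rate", PySem.Dict.ofList [("num", 0), ("total", 0)])] = mkSt 0 0 0 0 := by
    rfl
  dsimp only
  rw [hinit, foldl_gsStep_mkSt]
  simp only [mkSt, PySem.Dict.keys_mk]
  simp [PySem.Dict.modify, PySem.Dict.insert, PySem.Dict.get?, PySem.Dict.contains,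
    PySem.Dict.getD, List.find?]
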